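/- GENERATED by tools/from_farm_form.py from prooffarm-gif/accepted/GifBitSize/Proof.lean (a worked proof of the farm's unit `GifBitSize`,
   accepted by the verdict) — do not edit. -/
import Gif.Spec.Units.GifBitSize
import Gif.Spec.AllSegs
import Asan.CheckWalk
/-
  Unit `GifBitSize` (gifalloc.c:23-32), the whole function: 11 instructions, one loop head (`cmp ecx, 8` at 0x107865), no memory
  access besides the `ret`, no check site, no callee. The counter `ecx` runs from 1 to at most 9; `eax = ecx` is returned.
-/

open X86 X86.User Asan ProgX.Base

set_option maxRecDepth 4000
set_option maxHeartbeats 4000000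

namespace Gif.Spec.GifBitSize

/-- 0x107868 `jg` not taken (`i ≤ 8` in the C loop test `i <= 8`): the walker's signed compare of the counter against 8, as a
bound on the ghost counter. -/
theorem gbs_counter_le8 (i : Nat) (hi9 : i ≤ 9) (hbr : ¬(8#32).toInt < (BitVec.ofNat 32 i).toInt) : i ≤ 8 := by
  have e8 : (8#32).toInt = 8 := by decide
  rw [e8, Gif.Spec.cnt32_toInt i (by omega)] at hbr
  omega

/-- 0x107875 `add ecx, 1`: the counter after the increment, as the ghost counter's successor. -/
theorem gbs_counter_succ (i : Nat) (hi9 : i ≤ 9) : Word.ofBV (BitVec.ofNat 32 i + 1#32) = UInt64.ofNat (i + 1) := by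
  rw [Gif.Spec.cnt32_succ_bv, Gif.Spec.cnt32_ofBV (i + 1) (by omega)]

/-- 0x10787a `mov eax, ecx` (gifalloc.c:32 `return i`): the post's two bounds on the result, from the loop invariant. -/
theorem gbs_result (i : Nat) (hi1 : 1 ≤ i) (hi9 : i ≤ 9) (x : Word) (hx : x = Word.ofBV (BitVec.ofNat 32 i)) :
    1 ≤ x.toNat ∧ x.toNat ≤ 9 := by
  rw [hx, Gif.Spec.toNat_ofBV_ofNat32 i (by omega)]
  exact ⟨hi1, hi9⟩

end Gif.Spec.GifBitSize

/-- `GifBitSize` satisfies its contract: the memory is unchanged (the function stores nothing) and the result is the loop counter,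
which the invariant `1 ≤ i ≤ 9` of the loop head 0x107865 bounds. The measure is `9 - ecx`. -/
theorem Gif.Spec.Proved.GifBitSize_ok : Gif.Spec.GifBitSize.Statement := by
  intro Lay hLay μ hμ u₀ hcode u ret he hpre
  v_entry he
  -- 0x107860 gifalloc.c:26 `i = 1`, up to the loop head
  u_walk hcode [hμ.vendor] until [Gif.L.GifBitSize.loop1] span [ProgX.Base.L.textLo, ProgX.Base.L.textHi] side (v_side)
  -- the loop head 0x107865 `cmp ecx, 8`: the counter is generalised, the flags are replaced by DF = 0
  obtain ⟨i, hi, hi1, hi9⟩ : ∃ i : Nat, s_107860.reg .rcx = UInt64.ofNat i ∧ 1 ≤ i ∧ i ≤ 9 :=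
    ⟨1, w_rcx, by omega, by omega⟩
  have hdf : s_107860.flags .df = false := by
    rw [w_flags]
    exact he_df
  replace w_kept := w_kept.mono_all (S' := [.rcx, .rax]) (by rfl)
  clear w_flags w_rcx
  u_loop [i] (fun v => 9 - (v.reg .rcx).toNat)
  -- the body: 0x107865 … 0x107878 `jmp` back to the head, or one of the two exits 0x107868 `jg`, 0x107873 `jge` to 0x10787a … `ret`
  u_walk hcode [hμ.vendor, Gif.Spec.cnt32_part i] until [Gif.L.GifBitSize.loop1] span [ProgX.Base.L.textLo, ProgX.Base.L.textHi] side (v_side)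
  · -- the exit 0x107868 `jg` (gifalloc.c:26 `i <= 8` false), after the `ret`
    refine ReachVia.done (Or.inl ?_)
    v_returned
    -- the post: nothing stored, the result is the counter
    exact ⟨w_mem, Gif.Spec.GifBitSize.gbs_result i hi1 hi9 _ w_rax⟩
  · -- the exit 0x107873 `jge` (gifalloc.c:27 `(1 << i) >= n`), after the `ret`
    refine ReachVia.done (Or.inl ?_)
    v_returned
    exact ⟨w_mem, Gif.Spec.GifBitSize.gbs_result i hi1 hi9 _ w_rax⟩
  · -- the back edge 0x107878 `jmp 107865`: the invariant with `i + 1`, which is at most 9 because the `jg` was not taken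
    have hi8 : i ≤ 8 := Gif.Spec.GifBitSize.gbs_counter_le8 i hi9 hbr_107868
    have hrcx : s_107878.reg .rcx = UInt64.ofNat (i + 1) := by
      rw [w_rcx]
      exact Gif.Spec.GifBitSize.gbs_counter_succ i hi9
    u_loop_back [i + 1]
    · -- 1 ≤ i + 1
      omega
    · -- i + 1 ≤ 9
      omega
    · -- DF: `add` wrote status flags only
      rw [w_flags]
      simp only [X86.User.df_setStatus]
      exact hdf
    · -- the measure `9 - ecx` decreases
      rw [hrcx, UInt64.toNat_ofNat', UInt64.toNat_ofNat']
      omega
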